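-- pv_equiv track=rewrite | github.com/diallomamadoub/customers | python/calculMetrique.py | evaluer_variable
-- ===== SOURCE A (Python) =====
-- def evaluer_variable(commentaire, positif_terms, negatif_terms):
--     commentaire = commentaire.lower()
--     score = 0
--     for term in positif_terms:
--         if term in commentaire:
--             score += 1
--     for term in negatif_terms:
--         if term in commentaire:
--             score -= 1
--     return score
-- ===== SOURCE B (Python) =====
-- def evaluer_variable(commentaire, positif_terms, negatif_terms):
--     c = commentaire.lower()
--     n = len(c)
--     lengths = {len(t) for t in positif_terms} | {len(t) for t in negatif_terms}
--     subs = {m: {c[i:i + m] for i in range(n - m + 1)} for m in lengths}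
--     weighted = [(t, 1) for t in positif_terms] + [(t, -1) for t in negatif_terms]
--     return sum(w for (t, w) in weighted if t in subs[len(t)])
-- ===== Notes on version B (the rewrite author's own statement) =====
-- stated objective: faster
-- what changed: Instead of scanning the comment once per term with the 'in' operator, B builds a per-length hash index of the comment's substrings once (one set of slices per distinct term length) and then tallies all terms in a single weighted pass of O(1) set lookups.
import Mathlib
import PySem

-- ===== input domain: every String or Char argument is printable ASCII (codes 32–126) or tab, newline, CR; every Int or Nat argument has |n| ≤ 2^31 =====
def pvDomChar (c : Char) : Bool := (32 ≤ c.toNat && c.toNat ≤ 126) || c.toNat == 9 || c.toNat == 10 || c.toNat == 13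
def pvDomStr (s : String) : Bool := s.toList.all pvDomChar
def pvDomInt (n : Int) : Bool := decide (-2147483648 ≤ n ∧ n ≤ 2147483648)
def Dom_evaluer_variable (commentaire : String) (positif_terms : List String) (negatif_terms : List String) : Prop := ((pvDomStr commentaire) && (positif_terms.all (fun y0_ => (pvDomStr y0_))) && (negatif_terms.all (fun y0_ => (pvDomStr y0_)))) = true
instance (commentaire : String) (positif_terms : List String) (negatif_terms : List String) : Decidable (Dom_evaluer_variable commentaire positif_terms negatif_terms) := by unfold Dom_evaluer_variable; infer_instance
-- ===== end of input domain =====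

-- B replaces A's per-term 'in' scans by a per-length substring index of the comment built once,
-- then a single weighted tally pass looking terms up in that index (objective: alternative).

-- ===== PORT A =====
def evaluer_variable (commentaire : String) (positif_terms : List String) (negatif_terms : List String) : Int :=
  let commentaire := PySem.Str.lower commentaire
  let score : Int := positif_terms.foldl
    (fun score term => if PySem.Str.isIn term commentaire then score + 1 else score) 0
  negatif_terms.foldl
    (fun score term => if PySem.Str.isIn term commentaire then score - 1 else score) score

-- ===== PORT B =====
-- the set {c[i:i+m] for i in range(n - m + 1)} of all length-m slices of c
def pvSlices (c : List Char) (n : Int) (m : Int) : PySem.Set (List Char) :=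
  PySem.Set.ofList ((PySem.List.pyRange 0 (n - m + 1) 1).map
    (fun i => PySem.List.slice c (some i) (some (i + m))))

def evaluer_variable_alt (commentaire : String) (positif_terms : List String) (negatif_terms : List String) : Int :=
  let cs := PySem.Str.lower commentaire
  let c := cs.toList
  let n : Int := PySem.Str.len cs
  let lengths : PySem.Set Int :=
    (PySem.Set.ofList (positif_terms.map (fun t => PySem.Str.len t))).union
      (PySem.Set.ofList (negatif_terms.map (fun t => PySem.Str.len t)))
  -- dict comprehension {m: {...} for m in lengths}: a fold inserting one entry per key
  -- (entry values depend only on the key, so CPython's set iteration order is immaterial)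
  let subs : PySem.Dict Int (PySem.Set (List Char)) :=
    lengths.foldl (fun d m => d.insert m (pvSlices c n m)) PySem.Dict.empty
  let weighted := positif_terms.map (fun t => (t, (1 : Int))) ++ negatif_terms.map (fun t => (t, (-1 : Int)))
  -- subs[len(t)]: the key len(t) is always present (it is in lengths), so getD's default is never used
  ((weighted.filter (fun p => (subs.getD (PySem.Str.len p.1) PySem.Set.empty).contains p.1.toList)).map (fun p => p.2)).sum

-- ===== PRECONDITION & SPEC =====
def Spec_evaluer_variable (commentaire : String) (positif_terms : List String) (negatif_terms : List String) (out : Int) : Prop := out = evaluer_variable_alt commentaire positif_terms negatif_terms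
instance (commentaire : String) (positif_terms : List String) (negatif_terms : List String) (out : Int) : Decidable (Spec_evaluer_variable commentaire positif_terms negatif_terms out) := by unfold Spec_evaluer_variable; infer_instance

-- ===== CLAIM (what is proved, stated in full; the proofs are below) =====
def Claim_equal_evaluer_variable : Prop := ∀ (commentaire : String) (positif_terms : List String) (negatif_terms : List String), Dom_evaluer_variable commentaire positif_terms negatif_terms → Spec_evaluer_variable commentaire positif_terms negatif_terms (evaluer_variable commentaire positif_terms negatif_terms)

-- ===== LEMMAS AND PROOFS =====

-- the length-|t| slice index of c contains t exactly when t is a substring of c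
theorem contains_pvSlices (c t : List Char) :
    (pvSlices c (c.length : Int) (t.length : Int)).contains t = PySem.Chars.isIn t c := by
  rw [Bool.eq_iff_iff, PySem.Set.contains_iff]
  unfold pvSlices
  rw [PySem.Set.mem_ofList, List.mem_map, ← PySem.Chars.exists_prefix_drop_iff_isIn]
  constructor
  · rintro ⟨i, hi, hslice⟩
    rw [PySem.List.mem_pyRange_one] at hi
    obtain ⟨h0, _⟩ := hi
    refine ⟨i.toNat, ?_⟩
    rw [show i = ((i.toNat : Nat) : Int) from (Int.toNat_of_nonneg h0).symm] at hslice
    rw [PySem.List.slice_natCast_add] at hslice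
    calc t = (c.drop i.toNat).take t.length := hslice.symm
      _ <+: c.drop i.toNat := List.take_prefix _ _
  · rintro ⟨j, hj⟩
    by_cases hle : j ≤ c.length - t.length ∧ t.length ≤ c.length
    · refine ⟨(j : Int), ?_, ?_⟩
      · rw [PySem.List.mem_pyRange_one]
        refine ⟨Int.natCast_nonneg j, by omega⟩
      · rw [PySem.List.slice_natCast_add]
        exact (List.prefix_iff_eq_take.mp hj ▸ rfl : (c.drop j).take t.length = t)
    · -- t is longer than the remaining suffix, so the prefix forces t = []
      have hlen : t.length ≤ (c.drop j).length := hj.length_le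
      rw [List.length_drop] at hlen
      have ht : t = [] := List.eq_nil_of_length_eq_zero (by omega)
      subst ht
      refine ⟨0, ?_, ?_⟩
      · rw [PySem.List.mem_pyRange_one]; refine ⟨le_refl _, by omega⟩
      · simp [PySem.List.slice, PySem.List.clampIdx]

-- A's positive loop counts the matching terms.
theorem foldl_pos (f : String → Bool) :
    ∀ (l : List String) (s : Int),
      l.foldl (fun sc t => if f t then sc + 1 else sc) s = s + ((l.filter f).length : Int) := by
  intro l
  induction l with
  | nil => intro s; simp
  | cons x xs ih =>
    intro s
    by_cases hx : f x <;> (simp [List.foldl_cons, hx, ih]; try ring)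

-- A's negative loop subtracts the matching terms.
theorem foldl_neg (f : String → Bool) :
    ∀ (l : List String) (s : Int),
      l.foldl (fun sc t => if f t then sc - 1 else sc) s = s - ((l.filter f).length : Int) := by
  intro l
  induction l with
  | nil => intro s; simp
  | cons x xs ih =>
    intro s
    by_cases hx : f x <;> (simp [List.foldl_cons, hx, ih]; try ring)

-- looking a key up in the index dict yields that key's slice set
theorem getD_subs (c : List Char) (n : Int) (lengths : PySem.Set Int) (hnd : List.Nodup lengths)
    {m : Int} (hm : m ∈ lengths) :
    (lengths.foldl (fun d k => d.insert k (pvSlices c n k)) PySem.Dict.empty).getD m PySem.Set.empty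
      = pvSlices c n m := by
  apply PySem.Dict.getD_of_mem_items
  · rw [PySem.Dict.items_foldl_insert_fresh lengths (fun k => k) (fun k => pvSlices c n k)
      PySem.Dict.empty (fun a _ => PySem.Dict.contains_empty a) (by simpa using hnd)]
    exact List.mem_append.mpr (Or.inr (List.mem_map.mpr ⟨m, hm, rfl⟩))
  · exact PySem.Dict.nodup_keys_foldl_insert_key lengths (fun k => k)
      (fun _ k => pvSlices c n k) PySem.Dict.empty (by simp [PySem.Dict.keys_empty])

-- ===== VERDICT (by name: the statement is the Claim_ definition above) =====
theorem evaluer_variable_spec : Claim_equal_evaluer_variable := by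
  intro commentaire ps ns _
  unfold Spec_evaluer_variable evaluer_variable evaluer_variable_alt
  simp only
  set cl := PySem.Str.lower commentaire with hcl
  set lengths : PySem.Set Int :=
    (PySem.Set.ofList (ps.map (fun t => PySem.Str.len t))).union
      (PySem.Set.ofList (ns.map (fun t => PySem.Str.len t))) with hlengths
  have hnd : List.Nodup lengths := PySem.Set.nodup_union _ _ (PySem.Set.nodup_ofList _)
  have hpres : ∀ t : String, t ∈ ps ∨ t ∈ ns →
      ((lengths.foldl (fun d m => d.insert m (pvSlices cl.toList (PySem.Str.len cl) m))
          PySem.Dict.empty).getD (PySem.Str.len t) PySem.Set.empty).contains t.toList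
        = PySem.Str.isIn t cl := by
    intro t ht
    have hm : PySem.Str.len t ∈ lengths := by
      rw [hlengths, PySem.Set.mem_union, PySem.Set.mem_ofList, PySem.Set.mem_ofList]
      rcases ht with h | h
      · exact Or.inl (List.mem_map.mpr ⟨t, h, rfl⟩)
      · exact Or.inr (List.mem_map.mpr ⟨t, h, rfl⟩)
    rw [getD_subs cl.toList (PySem.Str.len cl) lengths hnd hm]
    have h1 : PySem.Str.len cl = (cl.toList.length : Int) := by
      simp [PySem.Str.len]
    have h2 : PySem.Str.len t = (t.toList.length : Int) := by
      simp [PySem.Str.len]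
    rw [h1, h2, contains_pvSlices]
    simp [PySem.Str.isIn]
  rw [foldl_pos (fun t => PySem.Str.isIn t cl), foldl_neg (fun t => PySem.Str.isIn t cl)]
  rw [List.filter_congr (q := fun p : String × Int => PySem.Str.isIn p.1 cl)
    (fun p hp => by
      rcases List.mem_append.mp hp with h | h
      · exact hpres p.1 (Or.inl (by obtain ⟨t, ht, rfl⟩ := List.mem_map.mp h; exact ht))
      · exact hpres p.1 (Or.inr (by obtain ⟨t, ht, rfl⟩ := List.mem_map.mp h; exact ht)))]
  rw [List.filter_append, List.map_append, List.sum_append]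
  rw [List.filter_map, List.filter_map, List.map_map, List.map_map]
  simp only [Function.comp_def]
  rw [PySem.List.sum_map_const_int, PySem.List.sum_map_const_int]
  ring
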